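-- pv_equiv track=rewrite | github.com/HAHAHAHA123456/MyUtils | LeTou_StaticFunc.py | staticLotteryNumber
-- ===== SOURCE A (Python) =====
-- def staticCounts_Continous_leaveOut(dataList, number):
--     idx = 0
--     countsNumber = 0
--     continousNumber = 0
--     leave_outNumber = 0
--     maxContinous = 0
--     maxLeaveNumber = 0
--     while idx < len(dataList):
--         if number in dataList[idx]:
--             countsNumber += 1
--             continousNumber += 1
--             leave_outNumber = 0
--             if continousNumber > maxContinous:
--                 maxContinous = continousNumber
--         else:
--             continousNumber = 0
--             leave_outNumber += 1
--             if leave_outNumber > maxLeaveNumber: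
--                 maxLeaveNumber = leave_outNumber
--         idx += 1
--     return countsNumber, maxContinous, maxLeaveNumber
--
-- def staticLotteryNumber(dataList):
--     staticInfo_dict = {}
--     for i in range(1, 36):
--         tempDict = {}
--         countsNumber, maxContinous, maxLeaveNumber = staticCounts_Continous_leaveOut(dataList=dataList, number=i)
--         tempDict['countsNumber'] = countsNumber
--         tempDict['maxContinous'] = maxContinous
--         tempDict['maxLeaveNumber'] = maxLeaveNumber
--         staticInfo_dict[str(i)] = tempDict
--     return staticInfo_dict
-- ===== SOURCE B (Python) =====
-- def staticLotteryNumber(dataList):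
--     n = len(dataList)
--     result = {}
--     for i in range(1, 36):
--         positions = [idx for idx, row in enumerate(dataList) if i in row]
--         max_gap = 0
--         run = 0
--         max_run = 0
--         prev = -1
--         for p in positions:
--             gap = p - prev - 1
--             if gap > max_gap:
--                 max_gap = gap
--             run = run + 1 if p == prev + 1 else 1
--             if run > max_run:
--                 max_run = run
--             prev = p
--         tail = n - 1 - prev
--         if tail > max_gap:
--             max_gap = tail
--         result[str(i)] = {'countsNumber': len(positions),
--                           'maxContinous': max_run,
--                           'maxLeaveNumber': max_gap}
--     return result
-- ===== Notes on version B (the rewrite author's own statement) =====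
-- stated objective: alternative
-- what changed: Instead of a stateful while-loop per number maintaining five running counters (count, current/max streak, current/max gap), B first collects each number's draw-index positions with a comprehension and derives count, max consecutive streak and max gap (including leading/trailing gaps) arithmetically from consecutive position differences.
import Mathlib
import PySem

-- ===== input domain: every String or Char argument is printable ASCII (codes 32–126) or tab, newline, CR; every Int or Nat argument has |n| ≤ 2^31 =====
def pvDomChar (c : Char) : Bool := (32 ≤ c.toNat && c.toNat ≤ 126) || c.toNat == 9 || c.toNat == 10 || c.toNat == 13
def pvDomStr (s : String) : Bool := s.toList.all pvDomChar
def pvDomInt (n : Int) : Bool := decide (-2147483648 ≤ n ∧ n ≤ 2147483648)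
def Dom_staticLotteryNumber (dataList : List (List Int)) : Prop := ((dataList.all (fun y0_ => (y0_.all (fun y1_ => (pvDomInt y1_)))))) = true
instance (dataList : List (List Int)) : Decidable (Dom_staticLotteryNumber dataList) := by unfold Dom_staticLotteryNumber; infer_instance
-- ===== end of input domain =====

-- B replaces A's per-number stateful streak/gap while-loop by a positions list per number
-- and gap arithmetic over consecutive positions (objective: alternative decomposition).

-- ===== PORT A =====
-- state: (countsNumber, continousNumber, leave_outNumber, maxContinous, maxLeaveNumber)
def pvStepA (number : Int) (s : Int × Int × Int × Int × Int) (row : List Int) :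
    Int × Int × Int × Int × Int :=
  match s with
  | (countsNumber, continousNumber, leave_outNumber, maxContinous, maxLeaveNumber) =>
    if row.contains number then
      let countsNumber := countsNumber + 1
      let continousNumber := continousNumber + 1
      let leave_outNumber := 0
      let maxContinous := if continousNumber > maxContinous then continousNumber else maxContinous
      (countsNumber, continousNumber, leave_outNumber, maxContinous, maxLeaveNumber)
    else
      let continousNumber := 0
      let leave_outNumber := leave_outNumber + 1
      let maxLeaveNumber := if leave_outNumber > maxLeaveNumber then leave_outNumber else maxLeaveNumber
      (countsNumber, continousNumber, leave_outNumber, maxContinous, maxLeaveNumber)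

def staticCounts_Continous_leaveOut (dataList : List (List Int)) (number : Int) :
    Int × Int × Int :=
  let s := dataList.foldl (pvStepA number) (0, 0, 0, 0, 0)
  (s.1, s.2.2.2.1, s.2.2.2.2)

def staticLotteryNumber (dataList : List (List Int)) : List (String × List (String × Int)) :=
  let d : PySem.Dict String (List (String × Int)) :=
    (PySem.List.pyRange 1 36 1).foldl
      (fun d i =>
        let t := staticCounts_Continous_leaveOut dataList i
        let tempDict : PySem.Dict String Int :=
          ((PySem.Dict.empty.insert "countsNumber" t.1).insert "maxContinous" t.2.1).insert
            "maxLeaveNumber" t.2.2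
        d.insert (PySem.Int.toStr i) tempDict.items)
      PySem.Dict.empty
  d.items

-- ===== PORT B =====
def pvPositions (dataList : List (List Int)) (i : Int) : List Int :=
  (PySem.List.enumerate dataList 0).filterMap
    (fun p => if p.2.contains i then some p.1 else none)

-- state: (max_gap, run, max_run, prev)
def pvStepB (s : Int × Int × Int × Int) (p : Int) : Int × Int × Int × Int :=
  match s with
  | (maxGap, run, maxRun, prev) =>
    let gap := p - prev - 1
    let maxGap := if gap > maxGap then gap else maxGap
    let run := if p == prev + 1 then run + 1 else 1
    let maxRun := if run > maxRun then run else maxRun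
    (maxGap, run, maxRun, p)

def pvStatsFor (dataList : List (List Int)) (i : Int) : Int × Int × Int :=
  let n : Int := dataList.length
  let positions := pvPositions dataList i
  let s := positions.foldl pvStepB (0, 0, 0, -1)
  let tail := n - 1 - s.2.2.2
  let maxGap := if tail > s.1 then tail else s.1
  ((positions.length : Int), s.2.2.1, maxGap)

def staticLotteryNumber_alt (dataList : List (List Int)) : List (String × List (String × Int)) :=
  let d : PySem.Dict String (List (String × Int)) :=
    (PySem.List.pyRange 1 36 1).foldl
      (fun d i =>
        let t := pvStatsFor dataList i
        d.insert (PySem.Int.toStr i)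
          [("countsNumber", t.1), ("maxContinous", t.2.1), ("maxLeaveNumber", t.2.2)])
      PySem.Dict.empty
  d.items

-- ===== PRECONDITION & SPEC =====
def Spec_staticLotteryNumber (dataList : List (List Int)) (out : List (String × List (String × Int))) : Prop := out = staticLotteryNumber_alt dataList
instance (dataList : List (List Int)) (out : List (String × List (String × Int))) : Decidable (Spec_staticLotteryNumber dataList out) := by unfold Spec_staticLotteryNumber; infer_instance

-- ===== CLAIM (what is proved, stated in full; the proofs are below) =====
def Claim_equal_staticLotteryNumber : Prop := ∀ (dataList : List (List Int)), Dom_staticLotteryNumber dataList → Spec_staticLotteryNumber dataList (staticLotteryNumber dataList)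

-- ===== LEMMAS AND PROOFS =====

lemma pvPositions_append (xs : List (List Int)) (x : List Int) (i : Int) :
    pvPositions (xs ++ [x]) i =
      pvPositions xs i ++ (if x.contains i then [(xs.length : Int)] else []) := by
  simp only [pvPositions, PySem.List.enumerate_append, List.filterMap_append,
    PySem.List.enumerate_cons, PySem.List.enumerate_nil, List.filterMap_cons, List.filterMap_nil]
  cases hc : x.contains i <;> simp

-- The loop invariant tying A's running-counter state to B's positions-scan state.
lemma pv_inv (i : Int) (xs : List (List Int)) :
    (xs.foldl (pvStepA i) (0, 0, 0, 0, 0)).1 = ((pvPositions xs i).length : Int) ∧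
    (xs.foldl (pvStepA i) (0, 0, 0, 0, 0)).2.1 =
      (if ((pvPositions xs i).foldl pvStepB (0, 0, 0, -1)).2.2.2 = (xs.length : Int) - 1
        then ((pvPositions xs i).foldl pvStepB (0, 0, 0, -1)).2.1 else 0) ∧
    (xs.foldl (pvStepA i) (0, 0, 0, 0, 0)).2.2.1 =
      (xs.length : Int) - 1 - ((pvPositions xs i).foldl pvStepB (0, 0, 0, -1)).2.2.2 ∧
    (xs.foldl (pvStepA i) (0, 0, 0, 0, 0)).2.2.2.1 =
      ((pvPositions xs i).foldl pvStepB (0, 0, 0, -1)).2.2.1 ∧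
    (xs.foldl (pvStepA i) (0, 0, 0, 0, 0)).2.2.2.2 =
      max ((pvPositions xs i).foldl pvStepB (0, 0, 0, -1)).1
        ((xs.length : Int) - 1 - ((pvPositions xs i).foldl pvStepB (0, 0, 0, -1)).2.2.2) ∧
    0 ≤ ((pvPositions xs i).foldl pvStepB (0, 0, 0, -1)).1 ∧
    -1 ≤ ((pvPositions xs i).foldl pvStepB (0, 0, 0, -1)).2.2.2 ∧
    ((pvPositions xs i).foldl pvStepB (0, 0, 0, -1)).2.2.2 ≤ (xs.length : Int) - 1 := by
  induction xs using List.reverseRecOn with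
  | nil => simp [pvPositions]
  | append_singleton xs x ih =>
    obtain ⟨h1, h2, h3, h4, h5, h6, h7, h8⟩ := ih
    rw [pvPositions_append, List.foldl_append]
    cases hc : x.contains i
    · simp only [Bool.false_eq_true, if_false, List.append_nil, List.foldl_cons,
        List.foldl_nil, List.length_append, List.length_cons, List.length_nil]
      set sa := xs.foldl (pvStepA i) (0, 0, 0, 0, 0) with hsa
      obtain ⟨a1, a2, a3, a4, a5⟩ := sa
      set sb := (pvPositions xs i).foldl pvStepB (0, 0, 0, -1) with hsb
      obtain ⟨b1, b2, b3, b4⟩ := sb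
      simp only at h1 h2 h3 h4 h5 h6 h7 h8
      simp only [pvStepA, hc, Bool.false_eq_true, if_false]
      push_cast at *
      split_ifs at * <;> omega
    · simp only [if_true, List.foldl_append, List.foldl_cons, List.foldl_nil,
        List.length_append, List.length_cons, List.length_nil]
      set sa := xs.foldl (pvStepA i) (0, 0, 0, 0, 0) with hsa
      obtain ⟨a1, a2, a3, a4, a5⟩ := sa
      set sb := (pvPositions xs i).foldl pvStepB (0, 0, 0, -1) with hsb
      obtain ⟨b1, b2, b3, b4⟩ := sb
      simp only at h1 h2 h3 h4 h5 h6 h7 h8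
      simp only [pvStepA, pvStepB, hc, if_true, beq_iff_eq]
      push_cast at *
      split_ifs at * <;> omega

lemma pv_perNumber (dataList : List (List Int)) (i : Int) :
    staticCounts_Continous_leaveOut dataList i = pvStatsFor dataList i := by
  obtain ⟨h1, h2, h3, h4, h5, h6, h7, h8⟩ := pv_inv i dataList
  simp only [staticCounts_Continous_leaveOut, pvStatsFor]
  refine Prod.ext h1 (Prod.ext ?_ ?_) <;> simp only
  · exact h4
  · rw [h5]; split_ifs with hi <;> omega

theorem staticLotteryNumber_spec : Claim_equal_staticLotteryNumber := by
  intro dataList _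
  show staticLotteryNumber dataList = staticLotteryNumber_alt dataList
  simp only [staticLotteryNumber, staticLotteryNumber_alt, pv_perNumber]
  congr 1

-- ===== VERDICT (by name: the statement is the Claim_ definition above) =====
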